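-- pv_equiv track=rewrite | github.com/a-mackay/music | metadata_scripts/get-metadata.py | format_album
-- ===== SOURCE A (Python) =====
-- ALBUM_SUFFIXES = [
--     " (320)",
--     " (MP3.320)",
--     " (MP3.V0)",
--     " (MP3.128)",
--     " (MP3.185)",
--     " (MP3.192)",
--     " (MP3.256)",
--     " (MP3.V2)",
--     " (MP3.Various)",
--     " (MP3.Bad)",
--     " (V0)",
--     " (64)",
--     " (128)",
--     " (160)",
--     " (192)",
--     " (256)",
--     " (VBR)",
-- ]
--
-- def format_album(album_name: str) -> str:
--     matching_suffix = None
--     try: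
--         matching_suffix = [suffix for suffix in ALBUM_SUFFIXES if album_name.endswith(suffix)][0]
--     except:
--         pass
--
--     if matching_suffix is None:
--         return album_name
--     else:
--         suffix_length = len(matching_suffix)
--         return album_name[:-suffix_length]
-- ===== SOURCE B (Python) =====
-- ALBUM_SUFFIXES = [
--     " (320)",
--     " (MP3.320)",
--     " (MP3.V0)",
--     " (MP3.128)",
--     " (MP3.185)",
--     " (MP3.192)",
--     " (MP3.256)",
--     " (MP3.V2)",
--     " (MP3.Various)",
--     " (MP3.Bad)",
--     " (V0)",
--     " (64)",
--     " (128)",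
--     " (160)",
--     " (192)",
--     " (256)",
--     " (VBR)",
-- ]
--
-- _SUFFIX_SET = frozenset(ALBUM_SUFFIXES)
-- _SUFFIX_LENGTHS = [5, 6, 9, 10, 14]  # sorted distinct lengths of the suffixes
--
--
-- def format_album(album_name: str) -> str:
--     for n in _SUFFIX_LENGTHS:
--         cut = len(album_name) - n
--         if cut >= 0 and album_name[cut:] in _SUFFIX_SET:
--             return album_name[:cut]
--     return album_name
-- ===== Notes on version B (the rewrite author's own statement) =====
-- stated objective: alternative
-- what changed: A scans all 17 suffix literals with endswith and takes the first hit; B instead slices the trailing substring once per distinct suffix length (5, 6, 9, 10, 14) and looks it up in a frozenset built once, so the per-suffix scan disappears.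
import Mathlib
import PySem

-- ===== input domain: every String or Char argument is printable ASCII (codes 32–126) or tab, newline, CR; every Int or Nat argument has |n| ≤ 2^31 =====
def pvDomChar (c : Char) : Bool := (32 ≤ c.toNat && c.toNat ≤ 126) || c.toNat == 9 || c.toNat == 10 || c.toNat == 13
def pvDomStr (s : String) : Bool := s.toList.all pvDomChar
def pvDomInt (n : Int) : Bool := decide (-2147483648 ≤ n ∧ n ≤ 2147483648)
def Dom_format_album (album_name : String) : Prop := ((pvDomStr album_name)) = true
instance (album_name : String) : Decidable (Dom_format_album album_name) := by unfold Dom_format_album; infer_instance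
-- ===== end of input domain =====

-- B replaces A's scan over all 17 quality suffixes by five hash-set lookups of the
-- trailing slice, one per distinct suffix length (objective: alternative/simpler lookup structure).

-- ===== PORT A =====
def pvAlbumSuffixes : List String := [" (320)", " (MP3.320)", " (MP3.V0)", " (MP3.128)",
  " (MP3.185)", " (MP3.192)", " (MP3.256)", " (MP3.V2)", " (MP3.Various)", " (MP3.Bad)",
  " (V0)", " (64)", " (128)", " (160)", " (192)", " (256)", " (VBR)"]

-- the list comprehension + [0] under the bare except is exactly head? of the filter
-- (IndexError caught -> matching_suffix stays None)
def format_album (album_name : String) : String :=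
  match (pvAlbumSuffixes.filter (fun suffix => PySem.Str.endswith album_name suffix)).head? with
  | none => album_name
  | some matching_suffix =>
      let suffix_length : Int := PySem.Str.len matching_suffix
      PySem.Str.slice album_name none (some (-suffix_length))

-- ===== PORT B =====
def pvSuffixSet : PySem.Set String := PySem.Set.ofList pvAlbumSuffixes
def pvSuffixLengths : List Int := [5, 6, 9, 10, 14]

def pvStripLoop (album_name : String) : List Int → String
  | [] => album_name
  | n :: ns =>
      let cut : Int := PySem.Str.len album_name - n
      if 0 ≤ cut ∧ PySem.Set.contains pvSuffixSet (PySem.Str.slice album_name (some cut) none) = true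
      then PySem.Str.slice album_name none (some cut)
      else pvStripLoop album_name ns

def format_album_alt (album_name : String) : String := pvStripLoop album_name pvSuffixLengths


-- ===== PRECONDITION & SPEC =====
def Spec_format_album (album_name : String) (out : String) : Prop := out = format_album_alt album_name
instance (album_name : String) (out : String) : Decidable (Spec_format_album album_name out) := by unfold Spec_format_album; infer_instance

-- ===== CLAIM =====
def Claim_equal_format_album : Prop := ∀ (album_name : String), Dom_format_album album_name → Spec_format_album album_name (format_album album_name)

-- ===== LEMMAS AND PROOFS =====
lemma pvLenEq (s : String) : PySem.Str.len s = (s.toList.length : Int) := by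
  simp [pysem]

-- exclusivity
lemma pvEndsSlice (s t : String) (h : PySem.Str.endswith s t = true) :
    (t.toList.length : Int) ≤ PySem.Str.len s ∧
    PySem.Str.slice s (some (PySem.Str.len s - (t.toList.length : Int))) none = t := by
  rw [PySem.Str.endswith_eq, PySem.Chars.endswith_iff] at h
  obtain ⟨pre, hpre⟩ := h
  have hL : s.toList.length = pre.length + t.toList.length := by
    rw [← hpre]; simp
  constructor
  · rw [pvLenEq]; omega
  · apply String.toList_inj.mp
    rw [PySem.Str.toList_slice, PySem.Chars.slice_eq_listSlice, pvLenEq]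
    have : (s.toList.length : Int) - (t.toList.length : Int) = ((pre.length : Nat) : Int) := by omega
    rw [this, PySem.List.slice_from_natCast, ← hpre, List.drop_left]

-- no suffix of the right shape matches ⇒ contains is false
lemma pvNoMatch (s : String) (n : Int) (hn : 0 ≤ n) (h0 : 0 ≤ PySem.Str.len s - n)
    (h : ∀ t ∈ pvAlbumSuffixes, PySem.Str.endswith s t = false ∨ (t.toList.length : Int) ≠ n) :
    PySem.Set.contains pvSuffixSet (PySem.Str.slice s (some (PySem.Str.len s - n)) none) = true → False := by
  intro hc
  rw [PySem.Set.contains_iff] at hc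
  have hmem : PySem.Str.slice s (some (PySem.Str.len s - n)) none ∈ pvAlbumSuffixes := by
    have := PySem.Set.mem_ofList (xs := pvAlbumSuffixes) (y := PySem.Str.slice s (some (PySem.Str.len s - n)) none)
    exact this.mp hc
  set t := PySem.Str.slice s (some (PySem.Str.len s - n)) none with ht
  -- t is a suffix of s of length n
  have hL : PySem.Str.len s = (s.toList.length : Int) := pvLenEq s
  have hdrop : t.toList = s.toList.drop (PySem.Str.len s - n).toNat := by
    rw [ht, PySem.Str.toList_slice, PySem.Chars.slice_eq_listSlice,
      PySem.List.slice_from _ h0]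
  have hsuf : t.toList <:+ s.toList := by rw [hdrop]; exact List.drop_suffix _ _
  have hlen : (t.toList.length : Int) = n := by
    rw [hdrop, List.length_drop]
    rw [hL] at h0 ⊢
    omega
  rcases h t hmem with he | hne
  · rw [PySem.Str.endswith_eq, ← Bool.not_eq_true, PySem.Chars.endswith_iff] at he
    exact he hsuf
  · exact hne hlen

-- step lemmas
lemma pvStepNeg (s : String) (n : Int) (ns : List Int)
    (h : ¬ (0 ≤ PySem.Str.len s - n ∧ PySem.Set.contains pvSuffixSet (PySem.Str.slice s (some (PySem.Str.len s - n)) none) = true)) :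
    pvStripLoop s (n :: ns) = pvStripLoop s ns := by
  simp only [pvStripLoop]
  rw [if_neg h]

lemma pvStepPos (s : String) (n : Int) (ns : List Int)
    (h : 0 ≤ PySem.Str.len s - n ∧ PySem.Set.contains pvSuffixSet (PySem.Str.slice s (some (PySem.Str.len s - n)) none) = true) :
    pvStripLoop s (n :: ns) = PySem.Str.slice s none (some (PySem.Str.len s - n)) := by
  simp only [pvStripLoop]
  rw [if_pos h]

-- final equality of the two result slices
lemma pvFinal (s : String) (n : Int) (h1 : 0 < n) (h2 : n ≤ PySem.Str.len s) :
    PySem.Str.slice s none (some (-n)) = PySem.Str.slice s none (some (PySem.Str.len s - n)) := by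
  have hL := pvLenEq s
  lift n to ℕ using h1.le with m
  apply String.toList_inj.mp
  rw [PySem.Str.toList_slice, PySem.Str.toList_slice, PySem.Chars.slice_eq_listSlice,
    PySem.Chars.slice_eq_listSlice]
  rw [PySem.List.slice_to_neg_natCast _ m (by exact_mod_cast h1)]
  have : PySem.Str.len s - (m : Int) = ((s.toList.length - m : Nat) : Int) := by omega
  rw [this, PySem.List.slice_to_natCast]

lemma pvPairwise : ∀ t ∈ pvAlbumSuffixes, ∀ u ∈ pvAlbumSuffixes,
    t = u ∨ (¬ t.toList <:+ u.toList ∧ ¬ u.toList <:+ t.toList) := by decide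

lemma pvUnique (s t u : String) (ht : t ∈ pvAlbumSuffixes) (hu : u ∈ pvAlbumSuffixes)
    (et : PySem.Str.endswith s t = true) (eu : PySem.Str.endswith s u = true) : t = u := by
  rcases pvPairwise t ht u hu with h | ⟨h1, h2⟩
  · exact h
  · exfalso
    rw [PySem.Str.endswith_eq, PySem.Chars.endswith_iff] at et eu
    rcases List.suffix_or_suffix_of_suffix et eu with h' | h' <;> [exact h1 h'; exact h2 h']

lemma pvLoopNone (s : String) (h : ∀ t ∈ pvAlbumSuffixes, PySem.Str.endswith s t = false) :
    ∀ ms : List Int, (∀ n ∈ ms, 0 ≤ n) → pvStripLoop s ms = s := by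
  intro ms
  induction ms with
  | nil => intro _; rfl
  | cons n ns ih =>
    intro hpos
    rw [pvStepNeg s n ns ?_]
    · exact ih (fun m hm => hpos m (List.mem_cons_of_mem _ hm))
    · rintro ⟨hc0, hcc⟩
      exact pvNoMatch s n (hpos n (List.mem_cons_self ..)) hc0
        (fun t ht => Or.inl (h t ht)) hcc

lemma pvLoopHit (s t : String) (ht : t ∈ pvAlbumSuffixes) (et : PySem.Str.endswith s t = true) :
    ∀ ms : List Int, (∀ n ∈ ms, 0 ≤ n) → ((t.toList.length : Int) ∈ ms) →
    pvStripLoop s ms = PySem.Str.slice s none (some (PySem.Str.len s - (t.toList.length : Int))) := by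
  intro ms
  induction ms with
  | nil => intro _ hmem; exact absurd hmem (List.not_mem_nil)
  | cons n ns ih =>
    intro hpos hmem
    obtain ⟨hle, hsl⟩ := pvEndsSlice s t et
    by_cases hn : (t.toList.length : Int) = n
    · rw [← hn]
      rw [pvStepPos s _ ns ⟨by omega, ?_⟩]
      rw [hsl]
      rw [PySem.Set.contains_iff, pvSuffixSet, PySem.Set.mem_ofList]
      exact ht
    · rw [pvStepNeg s n ns ?_]
      · exact ih (fun m hm => hpos m (List.mem_cons_of_mem _ hm))
          ((List.mem_cons.mp hmem).resolve_left hn)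
      · rintro ⟨hc0, hcc⟩
        refine pvNoMatch s n (hpos n (List.mem_cons_self ..)) hc0 (fun u hu => ?_) hcc
        by_cases eu : PySem.Str.endswith s u = true
        · have := pvUnique s t u ht hu et eu
          subst this
          exact Or.inr hn
        · exact Or.inl (by simpa using eu)

lemma pvMemLengths : ∀ t ∈ pvAlbumSuffixes, ((t.toList.length : Nat) : Int) ∈ pvSuffixLengths := by decide

lemma pvLengthsPos : ∀ n ∈ pvSuffixLengths, (0:Int) ≤ n := by decide

-- ===== VERDICT =====
theorem format_album_spec : Claim_equal_format_album := by
  intro s _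
  unfold Spec_format_album format_album format_album_alt
  rw [List.head?_filter]
  cases hfind : pvAlbumSuffixes.find? (fun suffix => PySem.Str.endswith s suffix) with
  | none =>
    have hall : ∀ t ∈ pvAlbumSuffixes, PySem.Str.endswith s t = false := by
      intro t ht
      have := List.find?_eq_none.mp hfind t ht
      simpa using this
    rw [pvLoopNone s hall pvSuffixLengths pvLengthsPos]
  | some t =>
    have ht : t ∈ pvAlbumSuffixes := List.mem_of_find?_eq_some hfind
    have et : PySem.Str.endswith s t = true := by
      have := List.find?_some hfind
      simpa using this
    obtain ⟨hle, _⟩ := pvEndsSlice s t et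
    rw [pvLoopHit s t ht et pvSuffixLengths pvLengthsPos (pvMemLengths t ht)]
    have hlt : PySem.Str.len t = (t.toList.length : Int) := pvLenEq t
    show PySem.Str.slice s none (some (-(PySem.Str.len t))) = _
    rw [hlt]
    have hpos : (0:Int) < (t.toList.length : Int) := by
      have : t ≠ "" := by rintro rfl; simp [pvAlbumSuffixes] at ht
      have : t.toList ≠ [] := by simpa [String.toList_eq_nil_iff] using this
      have := List.length_pos_of_ne_nil this
      exact_mod_cast this
    exact pvFinal s (t.toList.length : Int) hpos hle
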